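-- pv_equiv track=rewrite | github.com/mmoneib/Pretext | pretext/actions/text.py | tokenize_by_words
-- ===== SOURCE A (Python) =====
-- def tokenize_by_words(text, numOfWords):
--   tokensList=[]
--   token=""
--   isEmpty=True
--   wordsCount=0
--   for c in text:
--     if (c==' ' or c=='\n') and isEmpty==False:
--       wordsCount=wordsCount+1
--       if wordsCount==numOfWords:
--         tokensList.append(token) # Must use append; otherwise, it would be a list of chars.
--         token=""
--         wordsCount=0
--     if c==' ' or c=='\n':
--       isEmpty=True
--     else:
--       isEmpty=False
--     token+=c # Spaces and new-lines after last word included.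
--   if token!="":
--     tokensList.append(token)
--   return tokensList
-- ===== SOURCE B (Python) =====
-- def tokenize_by_words(text, numOfWords):
--   # First pass: record the indices of whitespace chars that complete every
--   # numOfWords-th word. Second pass: slice the text at those indices.
--   cuts = []
--   ends = 0
--   prev_nonws = False
--   for i, c in enumerate(text):
--     if c == ' ' or c == '\n':
--       if prev_nonws:
--         ends += 1
--         if numOfWords > 0 and ends % numOfWords == 0:
--           cuts.append(i)
--       prev_nonws = False
--     else:
--       prev_nonws = True
--   tokens = []
--   prev = 0
--   for cut in cuts:
--     tokens.append(text[prev:cut])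
--     prev = cut
--   if text[prev:]:
--     tokens.append(text[prev:])
--   return tokens
-- ===== Notes on version B (the rewrite author's own statement) =====
-- stated objective: alternative
-- what changed: Instead of growing a running token string character by character, B makes one pass that records the indices of the whitespace characters completing every numOfWords-th word, then a second pass that slices the text at those cut indices; this avoids per-character string concatenation.
import Mathlib
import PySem

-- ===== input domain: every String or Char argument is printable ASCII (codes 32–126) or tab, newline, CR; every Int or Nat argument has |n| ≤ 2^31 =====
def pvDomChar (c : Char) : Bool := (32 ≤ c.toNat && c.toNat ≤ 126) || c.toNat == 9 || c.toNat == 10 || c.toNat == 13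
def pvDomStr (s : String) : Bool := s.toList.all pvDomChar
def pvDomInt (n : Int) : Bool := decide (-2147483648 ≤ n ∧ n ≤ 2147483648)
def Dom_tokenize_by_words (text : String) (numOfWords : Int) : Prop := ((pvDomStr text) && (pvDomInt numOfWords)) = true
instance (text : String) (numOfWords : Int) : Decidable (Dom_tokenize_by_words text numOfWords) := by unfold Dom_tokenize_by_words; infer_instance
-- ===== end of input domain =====

-- B replaces A's running token string by a first pass that records cut indices and a
-- second pass that slices the text at them (objective: alternative decomposition).

-- ===== PORT A =====
-- state: (tokensList, token, isEmpty, wordsCount); token kept as List Char ("" = [])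
def pvStepA (numOfWords : Int) (s : List String × List Char × Bool × Int) (c : Char) :
    List String × List Char × Bool × Int :=
  match s with
  | (tokensList, token, isEmpty, wordsCount) =>
    let (tokensList, token, wordsCount) :=
      if (c = ' ' ∨ c = '\n') ∧ isEmpty = false then
        let wordsCount := wordsCount + 1
        if wordsCount = numOfWords then (tokensList ++ [String.ofList token], ([] : List Char), (0 : Int))
        else (tokensList, token, wordsCount)
      else (tokensList, token, wordsCount)
    let isEmpty := if c = ' ' ∨ c = '\n' then true else false
    (tokensList, token ++ [c], isEmpty, wordsCount)

def tokenize_by_words (text : String) (numOfWords : Int) : List String :=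
  let s := text.toList.foldl (pvStepA numOfWords) ([], [], true, 0)
  if s.2.1 ≠ [] then s.1 ++ [String.ofList s.2.1] else s.1   -- if token!="": append

-- ===== PORT B =====
-- first pass: (cuts, ends, prev_nonws) over enumerate(text)
def pvStepB (numOfWords : Int) (s : List Int × Int × Bool) (ic : Int × Char) :
    List Int × Int × Bool :=
  match s, ic with
  | (cuts, ends, prev), (i, c) =>
    if c = ' ' ∨ c = '\n' then
      if prev then
        let ends := ends + 1
        if 0 < numOfWords ∧ PySem.Int.mod ends numOfWords = 0 then (cuts ++ [i], ends, false)
        else (cuts, ends, false)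
      else (cuts, ends, false)
    else (cuts, ends, true)

-- second pass: tokens.append(text[prev:cut]) for each cut, then the final text[prev:] if non-empty
def pvEmitB (cs : List Char) (prev : Int) : List Int → List String
  | [] =>
      let rest := PySem.List.slice cs (some prev) none
      if rest ≠ [] then [String.ofList rest] else []
  | cut :: rest => String.ofList (PySem.List.slice cs (some prev) (some cut)) :: pvEmitB cs cut rest

def tokenize_by_words_alt (text : String) (numOfWords : Int) : List String :=
  let cs := text.toList
  let s := (PySem.List.enumerate cs).foldl (pvStepB numOfWords) ([], 0, false)
  pvEmitB cs 0 s.1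

-- ===== PRECONDITION & SPEC =====
def Spec_tokenize_by_words (text : String) (numOfWords : Int) (out : List String) : Prop := out = tokenize_by_words_alt text numOfWords
instance (text : String) (numOfWords : Int) (out : List String) : Decidable (Spec_tokenize_by_words text numOfWords out) := by unfold Spec_tokenize_by_words; infer_instance

-- ===== CLAIM (what is proved, stated in full; the proofs are below) =====
def Claim_equal_tokenize_by_words : Prop := ∀ (text : String) (numOfWords : Int), Dom_tokenize_by_words text numOfWords → Spec_tokenize_by_words text numOfWords (tokenize_by_words text numOfWords)

-- ===== LEMMAS AND PROOFS =====

-- the slices text[a:c1], text[c1:c2], … (without the final piece)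
def pvPrefToks (cs : List Char) (a : Int) : List Int → List String
  | [] => []
  | cut :: rest => String.ofList (PySem.List.slice cs (some a) (some cut)) :: pvPrefToks cs cut rest


lemma pvGetD_cons_indep {x : Int} {xs : List Int} (a b : Int) :
    (x :: xs).getLast?.getD a = (x :: xs).getLast?.getD b := by
  rcases hg : (x :: xs).getLast? with _ | y
  · simp at hg
  · simp

lemma pvEmitB_decomp (cs : List Char) (a : Int) (cuts : List Int) :
    pvEmitB cs a cuts = pvPrefToks cs a cuts ++
      (let l := cuts.getLast?.getD a
       let rest := PySem.List.slice cs (some l) none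
       if rest ≠ [] then [String.ofList rest] else []) := by
  induction cuts generalizing a with
  | nil => simp [pvEmitB, pvPrefToks]
  | cons c r ih =>
      simp only [pvEmitB, pvPrefToks, ih c, List.cons_append]
      rcases r with _ | ⟨x, xs⟩
      · simp
      · simp [pvGetD_cons_indep c a]

lemma pvPrefToks_stable (cs : List Char) (d : Char) (a : Int) (cuts : List Int)
    (ha : 0 ≤ a ∧ a ≤ (cs.length : Int))
    (h : ∀ x ∈ cuts, 0 ≤ x ∧ x ≤ (cs.length : Int)) :
    pvPrefToks (cs ++ [d]) a cuts = pvPrefToks cs a cuts := by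
  induction cuts generalizing a with
  | nil => rfl
  | cons c r ih =>
      have hc := h c (by simp)
      have hrest : ∀ x ∈ r, 0 ≤ x ∧ x ≤ (cs.length : Int) := fun x hx => h x (by simp [hx])
      simp only [pvPrefToks, ih c hc hrest]
      congr 1
      rw [PySem.List.slice_toNat _ ha.1 hc.1, PySem.List.slice_toNat _ ha.1 hc.1]
      have h1 : a.toNat ≤ cs.length := by omega
      have h2 : c.toNat ≤ cs.length := by omega
      rw [List.drop_append_of_le_length h1, List.take_append_of_le_length (by simp; omega)]

lemma pvPrefToks_concat (cs : List Char) (a i : Int) (cuts : List Int) :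
    pvPrefToks cs a (cuts ++ [i]) =
      pvPrefToks cs a cuts ++
        [String.ofList (PySem.List.slice cs (some (cuts.getLast?.getD a)) (some i))] := by
  induction cuts generalizing a with
  | nil => simp [pvPrefToks]
  | cons c r ih =>
      simp only [List.cons_append, pvPrefToks, ih c]
      rcases r with _ | ⟨x, xs⟩
      · simp
      · simp [pvGetD_cons_indep c a]

lemma pvLastD_bounds {cuts : List Int} {L : Int} (hL : 0 ≤ L)
    (h : ∀ x ∈ cuts, 0 ≤ x ∧ x ≤ L) :
    0 ≤ cuts.getLast?.getD 0 ∧ cuts.getLast?.getD 0 ≤ L := by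
  rcases hg : cuts.getLast? with _ | x
  · simpa using hL
  · simpa using h x (List.mem_of_getLast? hg)

-- the running-state invariant relating A's fold to B's first pass over a common prefix p
lemma pvInv (nw : Int) (p : List Char) :
    (let a := p.foldl (pvStepA nw) ([], [], true, 0)
     let b := (PySem.List.enumerate p).foldl (pvStepB nw) ([], 0, false)
     b.2.2 = !a.2.2.1 ∧ 0 ≤ b.2.1 ∧
       a.2.2.2 = (if 0 < nw then PySem.Int.mod b.2.1 nw else b.2.1) ∧
       (∀ x ∈ b.1, 0 ≤ x ∧ x ≤ (p.length : Int)) ∧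
       a.1 = pvPrefToks p 0 b.1 ∧
       a.2.1 = p.drop (b.1.getLast?.getD 0).toNat) := by
  induction p using List.reverseRecOn with
  | nil =>
      simp only [PySem.List.enumerate_nil, List.foldl_nil]
      refine ⟨rfl, le_refl _, ?_, by simp, rfl, rfl⟩
      by_cases hpos : 0 < nw
      · rw [if_pos hpos, PySem.Int.mod_eq_emod_of_pos hpos, Int.zero_emod]
      · rw [if_neg hpos]
  | append_singleton p c ih =>
      simp only at ih ⊢
      rw [List.foldl_append, PySem.List.enumerate_append, List.foldl_append]
      set a := p.foldl (pvStepA nw) ([], [], true, 0) with ha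
      set b := (PySem.List.enumerate p).foldl (pvStepB nw) ([], 0, false) with hb
      obtain ⟨h1, h2, h3, h4, h5, h6⟩ := ih
      obtain ⟨hl0, hlL⟩ := pvLastD_bounds (by positivity) h4
      obtain ⟨tl, tok, ie, wc⟩ := a
      obtain ⟨cuts, ends, prev⟩ := b
      simp only at h1 h2 h3 h4 h5 h6 hl0 hlL ⊢
      have h4' : ∀ x ∈ cuts, 0 ≤ x ∧ x ≤ ((p ++ [c]).length : Int) := by
        intro x hx; have := h4 x hx; constructor
        · omega
        · simp only [List.length_append, List.length_cons, List.length_nil]; push_cast; omega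
      have htokstep : tok ++ [c] = (p ++ [c]).drop (cuts.getLast?.getD 0).toNat := by
        rw [List.drop_append_of_le_length (by omega), h6]
      have hprefstable : pvPrefToks (p ++ [c]) 0 cuts = pvPrefToks p 0 cuts :=
        pvPrefToks_stable p c 0 cuts (by simp) h4
      simp only [PySem.List.enumerate_cons, PySem.List.enumerate_nil, List.foldl_cons,
        List.foldl_nil, zero_add]
      by_cases hws : c = ' ' ∨ c = '\n'
      · by_cases hie : ie = false
        · -- word boundary: a word just ended
          have hprev : prev = true := by simp [h1, hie]
          by_cases hpos : 0 < nw
          · -- the modular-arithmetic core: wc+1 = nw ↔ (ends+1) % nw = 0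
            have hmodeq : PySem.Int.mod (ends + 1) nw = (wc + 1) % nw := by
              rw [PySem.Int.mod_eq_emod_of_pos hpos]
              have h3' : wc = ends % nw := by
                rw [h3, if_pos hpos, PySem.Int.mod_eq_emod_of_pos hpos]
              have : ends + 1 = (wc + 1) + nw * (ends / nw) := by
                have := Int.ediv_add_emod ends nw; omega
              rw [this, Int.add_mul_emod_self_left]
            have hwcb : 0 ≤ wc ∧ wc < nw := by
              rw [h3, if_pos hpos]
              exact ⟨PySem.Int.mod_nonneg _ hpos, PySem.Int.mod_lt _ hpos⟩
            by_cases hcut : wc + 1 = nw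
            · -- cut fires in both programs
              have hm0 : PySem.Int.mod (ends + 1) nw = 0 := by
                rw [hmodeq, hcut, Int.emod_self]
              have hA : pvStepA nw (tl, tok, ie, wc) c =
                  (tl ++ [String.ofList tok], [c], true, 0) := by
                simp [pvStepA, hws, hie, hcut]
              have hdvd : nw ∣ ends + 1 := (PySem.Int.mod_eq_zero_iff_dvd _ _).mp hm0
              have hB : pvStepB nw (cuts, ends, prev) ((p.length : Int), c) =
                  (cuts ++ [(p.length : Int)], ends + 1, false) := by
                simp [pvStepB, hws, hprev, hpos, hdvd]
              rw [hA, hB]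
              refine ⟨by simp, show (0:Int) ≤ ends + 1 by omega,
                show (0:Int) = if 0 < nw then PySem.Int.mod (ends + 1) nw else ends + 1 by
                  rw [if_pos hpos, hm0], ?_, ?_, ?_⟩
              · show ∀ x ∈ cuts ++ [(p.length : Int)], 0 ≤ x ∧ x ≤ ((p ++ [c]).length : Int)
                intro x hx
                rcases List.mem_append.mp hx with hx | hx
                · have := h4 x hx
                  refine ⟨by omega, ?_⟩
                  simp only [List.length_append, List.length_cons, List.length_nil]
                  push_cast; omega
                · simp at hx; subst hx
                  refine ⟨by positivity, ?_⟩
                  simp only [List.length_append, List.length_cons, List.length_nil]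
                  push_cast; omega
              · show tl ++ [String.ofList tok] =
                    pvPrefToks (p ++ [c]) 0 (cuts ++ [(p.length : Int)])
                rw [pvPrefToks_concat, hprefstable, h5]
                congr 2
                rw [PySem.List.slice_toNat _ hl0 (by positivity),
                  List.drop_append_of_le_length (by omega), h6]
                simp only [Int.toNat_natCast]
                rw [List.take_append_of_le_length (by simp),
                  List.take_of_length_le (by simp)]
              · show [c] = List.drop (((cuts ++ [(p.length : Int)]).getLast?.getD 0).toNat)
                    (p ++ [c])
                simp
            · -- word ended but the count is not yet numOfWords
              have hmne : ¬ (0 < nw ∧ PySem.Int.mod (ends + 1) nw = 0) := by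
                rintro ⟨-, hm⟩
                rw [hmodeq, Int.emod_eq_of_lt (by omega) (by omega)] at hm
                omega
              have hA : pvStepA nw (tl, tok, ie, wc) c = (tl, tok ++ [c], true, wc + 1) := by
                simp [pvStepA, hws, hie, hcut]
              have hB : pvStepB nw (cuts, ends, prev) ((p.length : Int), c) =
                  (cuts, ends + 1, false) := by
                simp [pvStepB, hws, hprev, hmne]
              rw [hA, hB]
              refine ⟨by simp, show (0:Int) ≤ ends + 1 by omega,
                show wc + 1 = if 0 < nw then PySem.Int.mod (ends + 1) nw else ends + 1 by
                  rw [if_pos hpos, hmodeq, Int.emod_eq_of_lt (by omega) (by omega)],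
                h4', show tl = pvPrefToks (p ++ [c]) 0 cuts by rw [hprefstable, h5], htokstep⟩
          · -- nw ≤ 0: neither side ever cuts
            have hcut : ¬ (wc + 1 = nw) := by rw [h3, if_neg hpos]; omega
            have hmne : ¬ (0 < nw ∧ PySem.Int.mod (ends + 1) nw = 0) := by
              rintro ⟨h, -⟩; exact hpos h
            have hA : pvStepA nw (tl, tok, ie, wc) c = (tl, tok ++ [c], true, wc + 1) := by
              simp [pvStepA, hws, hie, hcut]
            have hB : pvStepB nw (cuts, ends, prev) ((p.length : Int), c) =
                (cuts, ends + 1, false) := by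
              simp [pvStepB, hws, hprev, hmne]
            rw [hA, hB]
            refine ⟨by simp, show (0:Int) ≤ ends + 1 by omega,
              show wc + 1 = if 0 < nw then PySem.Int.mod (ends + 1) nw else ends + 1 by
                rw [if_neg hpos, h3, if_neg hpos],
              h4', show tl = pvPrefToks (p ++ [c]) 0 cuts by rw [hprefstable, h5], htokstep⟩
        · -- whitespace after whitespace (or at the very start): nothing counted
          have hie' : ie = true := by cases ie <;> simp_all
          have hprev : prev = false := by simp [h1, hie']
          have hA : pvStepA nw (tl, tok, ie, wc) c = (tl, tok ++ [c], true, wc) := by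
            simp [pvStepA, hws, hie']
          have hB : pvStepB nw (cuts, ends, prev) ((p.length : Int), c) =
              (cuts, ends, false) := by
            simp [pvStepB, hws, hprev]
          rw [hA, hB]
          exact ⟨by simp, h2, h3, h4',
            show tl = pvPrefToks (p ++ [c]) 0 cuts by rw [hprefstable, h5], htokstep⟩
      · -- ordinary word character
        have hA : pvStepA nw (tl, tok, ie, wc) c = (tl, tok ++ [c], false, wc) := by
          simp [pvStepA, hws]
        have hB : pvStepB nw (cuts, ends, prev) ((p.length : Int), c) =
            (cuts, ends, true) := by
          simp [pvStepB, hws]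
        rw [hA, hB]
        exact ⟨by simp, h2, h3, h4',
          show tl = pvPrefToks (p ++ [c]) 0 cuts by rw [hprefstable, h5], htokstep⟩

-- ===== VERDICT (by name: the statement is the Claim_ definition above) =====
theorem tokenize_by_words_spec : Claim_equal_tokenize_by_words := by
  intro text nw _
  unfold Spec_tokenize_by_words tokenize_by_words tokenize_by_words_alt
  have h := pvInv nw text.toList
  set a := text.toList.foldl (pvStepA nw) ([], [], true, 0) with ha
  set b := (PySem.List.enumerate text.toList).foldl (pvStepB nw) ([], 0, false) with hb
  obtain ⟨h1, h2, h3, h4, h5, h6⟩ := h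
  obtain ⟨hl0, hlL⟩ := pvLastD_bounds (by positivity) h4
  rw [pvEmitB_decomp]
  simp only
  rw [PySem.List.slice_from _ hl0, ← h6, h5]
  by_cases ht : a.2.1 = [] <;> simp [ht] <;> rw [← hb]
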